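-- pv_equiv track=rewrite | github.com/habibhamdoun/programmable-matter-project | custom_shapes.py | create_border_obstacles
-- ===== SOURCE A (Python) =====
-- def create_border_obstacles(grid_size, center, target_set):
--     """Create border obstacles"""
--     border_obstacles = set()
--     for r in range(grid_size):
--         for c in range(grid_size):
--             if r == 0 or r == grid_size - 1 or c == 0 or c == grid_size - 1:
--                 pos = (r, c)
--                 if pos not in target_set:
--                     border_obstacles.add(pos)
--     return border_obstacles
-- ===== SOURCE B (Python) =====
-- def create_border_obstacles(grid_size, center, target_set):
--     """Create border obstacles (border cells only, O(n) instead of O(n^2))"""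
--     n = grid_size
--     if n <= 0:
--         return set()
--     tgt = set(target_set)
--     if n == 1:
--         cells = [(0, 0)]
--     else:
--         cells = [(0, c) for c in range(n)]
--         for r in range(1, n - 1):
--             cells.append((r, 0))
--             cells.append((r, n - 1))
--         cells.extend((n - 1, c) for c in range(n))
--     return {p for p in cells if p not in tgt}
-- ===== Notes on version B (the rewrite author's own statement) =====
-- stated objective: faster
-- what changed: Instead of scanning all grid_size^2 cells and testing the border condition on each, B enumerates only the border cells directly (top row, the two side columns, bottom row) and filters them through a hash set built from target_set once.
import Mathlib
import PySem

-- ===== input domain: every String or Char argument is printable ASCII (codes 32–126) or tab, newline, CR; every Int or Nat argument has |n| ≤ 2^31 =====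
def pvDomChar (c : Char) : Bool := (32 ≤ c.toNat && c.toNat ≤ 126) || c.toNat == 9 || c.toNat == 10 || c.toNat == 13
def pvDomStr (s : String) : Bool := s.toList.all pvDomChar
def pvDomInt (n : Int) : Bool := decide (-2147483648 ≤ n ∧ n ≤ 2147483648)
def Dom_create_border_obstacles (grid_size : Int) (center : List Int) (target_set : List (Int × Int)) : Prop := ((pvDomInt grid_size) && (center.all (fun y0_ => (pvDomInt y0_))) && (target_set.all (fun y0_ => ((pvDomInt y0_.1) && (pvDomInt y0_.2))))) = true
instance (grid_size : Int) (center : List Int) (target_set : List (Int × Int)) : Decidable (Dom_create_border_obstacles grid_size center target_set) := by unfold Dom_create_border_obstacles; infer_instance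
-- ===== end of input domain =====

-- B enumerates only the border cells (top row, side columns, bottom row) instead of
-- scanning the whole grid_size x grid_size grid; same returned set, proved equal.


-- ===== PORT A =====
def create_border_obstacles (grid_size : Int) (center : List Int) (target_set : List (Int × Int)) : List (Int × Int) :=
  (PySem.List.pyRange 0 grid_size 1).foldl (fun border_obstacles r =>
    (PySem.List.pyRange 0 grid_size 1).foldl (fun border_obstacles c =>
      if r = 0 ∨ r = grid_size - 1 ∨ c = 0 ∨ c = grid_size - 1 then
        if (r, c) ∉ target_set then PySem.Set.add border_obstacles (r, c)
        else border_obstacles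
      else border_obstacles) border_obstacles) PySem.Set.empty

-- ===== PORT B =====
def create_border_obstacles_alt (grid_size : Int) (center : List Int) (target_set : List (Int × Int)) : List (Int × Int) :=
  if grid_size ≤ 0 then []
  else
    let cells : List (Int × Int) :=
      if grid_size = 1 then [(0, 0)]
      else
        (PySem.List.pyRange 0 grid_size 1).map (fun c => ((0 : Int), c))
        ++ (PySem.List.pyRange 1 (grid_size - 1) 1).flatMap (fun r => [(r, 0), (r, grid_size - 1)])
        ++ (PySem.List.pyRange 0 grid_size 1).map (fun c => (grid_size - 1, c))
    cells.filter (fun p => p ∉ target_set)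

-- ===== PRECONDITION & SPEC =====
def Spec_create_border_obstacles (grid_size : Int) (center : List Int) (target_set : List (Int × Int)) (out : List (Int × Int)) : Prop := out = create_border_obstacles_alt grid_size center target_set
instance (grid_size : Int) (center : List Int) (target_set : List (Int × Int)) (out : List (Int × Int)) : Decidable (Spec_create_border_obstacles grid_size center target_set out) := by unfold Spec_create_border_obstacles; infer_instance

-- ===== CLAIM (what is proved, stated in full; the proofs are below) =====
def Claim_equal_create_border_obstacles : Prop := ∀ (grid_size : Int) (center : List Int) (target_set : List (Int × Int)), Dom_create_border_obstacles grid_size center target_set → Spec_create_border_obstacles grid_size center target_set (create_border_obstacles grid_size center target_set)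

-- ===== LEMMAS AND PROOFS =====

-- conditional Set.add fold = Set.add fold over the filtered, mapped list
theorem foldl_set_add_if {α : Type} [BEq α] (p : Int → Prop) [DecidablePred p] (f : Int → α) :
    ∀ (l : List Int) (s : PySem.Set α),
      l.foldl (fun s x => if p x then PySem.Set.add s (f x) else s) s
        = ((l.filter (fun x => decide (p x))).map f).foldl PySem.Set.add s := by
  intro l
  induction l with
  | nil => intro s; rfl
  | cons x l ih =>
    intro s
    by_cases hx : p x <;> simp [hx, ih]

-- a fold of folds is a fold over the flatMap
theorem foldl_foldl_flatMap {γ σ : Type} :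
    ∀ (l : List Int) (g : Int → List γ) (h : σ → γ → σ) (init : σ),
      l.foldl (fun acc x => (g x).foldl h acc) init = (l.flatMap g).foldl h init := by
  intro l
  induction l with
  | nil => intro g h init; rfl
  | cons x l ih => intro g h init; simp [List.foldl_append, ih]

-- adding a duplicate-free list of fresh elements one by one just appends it
theorem foldl_set_add_nodup {α : Type} [BEq α] [LawfulBEq α] :
    ∀ (L s : List α), L.Nodup → (∀ x ∈ L, x ∉ s) → L.foldl PySem.Set.add s = s ++ L := by
  intro L
  induction L with
  | nil => intro s _ _; simp
  | cons x L ih =>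
    intro s hnd hfresh
    have hxs : x ∉ s := hfresh x (by simp)
    have hadd : PySem.Set.add s x = s ++ [x] := by
      simp [PySem.Set.add, PySem.Set.contains, hxs]
    rw [List.foldl_cons, hadd, ih (s ++ [x]) hnd.of_cons]
    · simp
    · intro y hy
      simp only [List.mem_append, List.mem_singleton]
      rintro (h | rfl)
      · exact hfresh y (by simp [hy]) h
      · exact (List.nodup_cons.mp hnd).1 hy

-- a flatMap whose pieces are keyed by the (duplicate-free) index list is duplicate-free
theorem nodup_flatMap_keyed (l : List Int) (g : Int → List (Int × Int))
    (hl : l.Nodup) (hg : ∀ r, (g r).Nodup) (hfst : ∀ r p, p ∈ g r → p.1 = r) :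
    (l.flatMap g).Nodup := by
  induction l with
  | nil => simp
  | cons x l ih =>
    simp only [List.flatMap_cons, List.nodup_append]
    refine ⟨hg x, ih hl.of_cons, ?_⟩
    intro p hp q hq heq
    subst heq
    have h1 : p.1 = x := hfst x p hp
    obtain ⟨r, hr, hpr⟩ := List.mem_flatMap.mp hq
    have h2 : p.1 = r := hfst r p hpr
    exact (List.nodup_cons.mp hl).1 (h1 ▸ h2 ▸ hr)

-- the geometric border cells, in A's row-major scan order
def borderRow (grid_size r : Int) : List (Int × Int) :=
  ((PySem.List.pyRange 0 grid_size 1).filter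
      (fun c => decide (r = 0 ∨ r = grid_size - 1 ∨ c = 0 ∨ c = grid_size - 1))).map (fun c => (r, c))

def borderCells (grid_size : Int) : List (Int × Int) :=
  (PySem.List.pyRange 0 grid_size 1).flatMap (borderRow grid_size)

theorem borderRow_fst (grid_size r : Int) (p : Int × Int) (hp : p ∈ borderRow grid_size r) : p.1 = r := by
  simp only [borderRow, List.mem_map] at hp
  obtain ⟨c, _, rfl⟩ := hp
  rfl

theorem borderRow_nodup (grid_size r : Int) : (borderRow grid_size r).Nodup := by
  refine List.Nodup.map (fun a b h => ?_) ((PySem.List.nodup_pyRange_one 0 grid_size).filter _)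
  exact (Prod.mk.injEq r a r b ▸ h).2

theorem borderCells_nodup (grid_size : Int) : (borderCells grid_size).Nodup :=
  nodup_flatMap_keyed _ _ (PySem.List.nodup_pyRange_one 0 grid_size)
    (borderRow_nodup grid_size) (borderRow_fst grid_size)

-- full rows: the border condition holds everywhere in row 0 and row grid_size-1
theorem borderRow_full (grid_size r : Int) (h : r = 0 ∨ r = grid_size - 1) :
    borderRow grid_size r = (PySem.List.pyRange 0 grid_size 1).map (fun c => (r, c)) := by
  unfold borderRow
  congr 1
  apply List.filter_eq_self.mpr
  intro c _
  rcases h with h | h <;> simp [h]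

-- interior rows: only the two ends survive the border filter
theorem borderRow_mid (grid_size r : Int) (h2 : 2 ≤ grid_size) (hr1 : 1 ≤ r) (hr2 : r < grid_size - 1) :
    borderRow grid_size r = [(r, 0), (r, grid_size - 1)] := by
  unfold borderRow
  have hsplit : PySem.List.pyRange 0 grid_size 1
      = PySem.List.pyRange 0 1 1 ++ PySem.List.pyRange 1 (grid_size - 1) 1
        ++ PySem.List.pyRange (grid_size - 1) grid_size 1 := by
    rw [PySem.List.pyRange_one_append 0 1 grid_size (by omega) (by omega),
        PySem.List.pyRange_one_append 1 (grid_size - 1) grid_size (by omega) (by omega)]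
    simp [List.append_assoc]
  have h0 : PySem.List.pyRange 0 1 1 = [(0 : Int)] := PySem.List.pyRange_one_singleton 0
  have hlast : PySem.List.pyRange (grid_size - 1) grid_size 1 = [grid_size - 1] := by
    have := PySem.List.pyRange_one_singleton (grid_size - 1)
    rwa [show grid_size - 1 + 1 = grid_size by ring] at this
  have hmidnil : (PySem.List.pyRange 1 (grid_size - 1) 1).filter
      (fun c => decide (r = 0 ∨ r = grid_size - 1 ∨ c = 0 ∨ c = grid_size - 1)) = [] := by
    apply List.filter_eq_nil_iff.mpr
    intro c hc
    have hc' := (PySem.List.mem_pyRange_one).mp hc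
    simp only [decide_eq_true_eq]
    omega
  rw [hsplit]
  simp only [List.filter_append, hmidnil, h0, hlast]
  have hr0 : r ≠ 0 := by omega
  have hrl : r ≠ grid_size - 1 := by omega
  simp [hr0, hrl]

-- the geometric border cells are exactly B's candidate list (for positive grid_size)
theorem borderCells_eq_cells (grid_size : Int) (hpos : 0 < grid_size) :
    borderCells grid_size =
      (if grid_size = 1 then [((0 : Int), (0 : Int))]
       else
        (PySem.List.pyRange 0 grid_size 1).map (fun c => ((0 : Int), c))
        ++ (PySem.List.pyRange 1 (grid_size - 1) 1).flatMap (fun r => [(r, 0), (r, grid_size - 1)])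
        ++ (PySem.List.pyRange 0 grid_size 1).map (fun c => (grid_size - 1, c))) := by
  by_cases h1 : grid_size = 1
  · subst h1
    decide
  · have h2 : 2 ≤ grid_size := by omega
    rw [if_neg h1]
    unfold borderCells
    have hsplit : PySem.List.pyRange 0 grid_size 1
        = PySem.List.pyRange 0 1 1 ++ PySem.List.pyRange 1 (grid_size - 1) 1
          ++ PySem.List.pyRange (grid_size - 1) grid_size 1 := by
      rw [PySem.List.pyRange_one_append 0 1 grid_size (by omega) (by omega),
          PySem.List.pyRange_one_append 1 (grid_size - 1) grid_size (by omega) (by omega)]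
      simp [List.append_assoc]
    have h0 : PySem.List.pyRange 0 1 1 = [(0 : Int)] := PySem.List.pyRange_one_singleton 0
    have hlast : PySem.List.pyRange (grid_size - 1) grid_size 1 = [grid_size - 1] := by
      have := PySem.List.pyRange_one_singleton (grid_size - 1)
      rwa [show grid_size - 1 + 1 = grid_size by ring] at this
    conv_lhs => rw [hsplit]
    simp only [List.flatMap_append, h0, hlast, List.flatMap_cons, List.flatMap_nil,
      List.append_nil]
    rw [borderRow_full grid_size 0 (Or.inl rfl), borderRow_full grid_size (grid_size - 1) (Or.inr rfl)]
    congr 1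
    congr 1
    apply List.flatMap_congr  -- pointwise equality of the middle rows
    intro r hr
    have hr' := (PySem.List.mem_pyRange_one).mp hr
    exact borderRow_mid grid_size r h2 hr'.1 hr'.2

-- A's nested fold is the Set.add fold over the ts-filtered border cells
theorem portA_eq_fold (grid_size : Int) (target_set : List (Int × Int)) (center : List Int) :
    create_border_obstacles grid_size center target_set
      = ((borderCells grid_size).filter (fun p => p ∉ target_set)).foldl PySem.Set.add [] := by
  unfold create_border_obstacles
  have hinner : ∀ (r : Int) (s : PySem.Set (Int × Int)),
      (PySem.List.pyRange 0 grid_size 1).foldl (fun border_obstacles c =>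
        if r = 0 ∨ r = grid_size - 1 ∨ c = 0 ∨ c = grid_size - 1 then
          if (r, c) ∉ target_set then PySem.Set.add border_obstacles (r, c)
          else border_obstacles
        else border_obstacles) s
      = ((borderRow grid_size r).filter (fun p => p ∉ target_set)).foldl PySem.Set.add s := by
    intro r s
    have hfun : (fun (border_obstacles : PySem.Set (Int × Int)) (c : Int) =>
        if r = 0 ∨ r = grid_size - 1 ∨ c = 0 ∨ c = grid_size - 1 then
          if (r, c) ∉ target_set then PySem.Set.add border_obstacles (r, c)
          else border_obstacles
        else border_obstacles)
        = (fun border_obstacles c =>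
          if (r = 0 ∨ r = grid_size - 1 ∨ c = 0 ∨ c = grid_size - 1) ∧ (r, c) ∉ target_set
          then PySem.Set.add border_obstacles (r, c) else border_obstacles) := by
      funext s c
      by_cases hb : r = 0 ∨ r = grid_size - 1 ∨ c = 0 ∨ c = grid_size - 1 <;>
        by_cases ht : (r, c) ∈ target_set <;> simp [hb, ht]
    rw [hfun, foldl_set_add_if
      (fun c => (r = 0 ∨ r = grid_size - 1 ∨ c = 0 ∨ c = grid_size - 1) ∧ (r, c) ∉ target_set)
      (fun c => (r, c)) (PySem.List.pyRange 0 grid_size 1) s]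
    congr 1
    unfold borderRow
    rw [List.filter_map, List.filter_filter]
    congr 1
    apply List.filter_congr
    intro c _
    by_cases hb : r = 0 ∨ r = grid_size - 1 ∨ c = 0 ∨ c = grid_size - 1 <;>
      by_cases ht : (r, c) ∈ target_set <;> simp [hb, ht, Function.comp]
  simp only [hinner]
  rw [foldl_foldl_flatMap (PySem.List.pyRange 0 grid_size 1)
      (fun r => (borderRow grid_size r).filter (fun p => p ∉ target_set)) PySem.Set.add
      PySem.Set.empty]
  have : (PySem.List.pyRange 0 grid_size 1).flatMap
      (fun r => (borderRow grid_size r).filter (fun p => p ∉ target_set))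
      = (borderCells grid_size).filter (fun p => p ∉ target_set) := by
    unfold borderCells
    induction PySem.List.pyRange 0 grid_size 1 with
    | nil => rfl
    | cons x l ih => simp only [List.flatMap_cons, List.filter_append, ih]
  rw [this]
  rfl

-- ===== VERDICT (by name: the statement is the Claim_ definition above) =====
theorem create_border_obstacles_spec : Claim_equal_create_border_obstacles := by
  intro grid_size center target_set _
  unfold Spec_create_border_obstacles
  rw [portA_eq_fold]
  have hnodup : ((borderCells grid_size).filter (fun p => p ∉ target_set)).Nodup :=
    (borderCells_nodup grid_size).filter _
  rw [foldl_set_add_nodup _ [] hnodup (by intro x _ h; simp at h), List.nil_append]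
  unfold create_border_obstacles_alt
  by_cases hpos : grid_size ≤ 0
  · rw [if_pos hpos]
    have : borderCells grid_size = [] := by
      unfold borderCells
      rw [PySem.List.pyRange_one_eq_nil (by omega)]
      rfl
    simp [this]
  · rw [if_neg hpos, borderCells_eq_cells grid_size (by omega)]
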